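-- pv_equiv track=rewrite | github.com/avkpol/codewars | 7 kyu Knight vs King.py | knight_vs_king
-- ===== SOURCE A (Python) =====
-- def knight_vs_king (knight_position, king_position):
--     #added "fake fields" f1, f2, f3, f4" to overcome "list out of range "error
--     columns = ['f1','f2','A','B','C','D','E','F','G','H','f3','f4']
--     # define x, y coordinates
--     x = (list(knight_position))[0]
--     y = (list(knight_position))[1]
--     # find proper column letter
--     y = columns.index(y)
--     # define moves reletively a cell
--     x_up = x + 1
--     x_dw = x - 1
--     x_upup = x + 2
--     x_dwdw = x - 2
--     y_ct = columns[y]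
--     y_lf = columns[y - 1]
--     y_rt = columns[y + 1]
--     y_lflf = columns[y - 2]
--     y_rtrt = columns[y + 2]
--     # define possible king moves
--     kg_pos = ([x_up,y_lf], [x_up, y_rt], [x_up, y_ct], [x_dw, y_lf],
--     [x_dw, y_rt], [x_dw, y_ct], [x, y_lf], [x, y_rt])
--     # define possible knight moves
--     kn_pos = ([x_upup, y_lf], [x_upup, y_rt], [x_up, y_lflf],
--     [x_up, y_rtrt], [x_dwdw, y_lf], [x_dwdw, y_rt],
--     [x_dw, y_lflf], [x_dw, y_rtrt])
--     # loop through coordinates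
--     knight_coord = [i for i in kg_pos]
--     king_coord = [i for i in kn_pos]
--     if  list(king_position) in knight_coord:
--         return 'King'
--     elif list(king_position) in king_coord:
--         return 'Knight'
--     else:
--         return "None"
-- ===== SOURCE B (Python) =====
-- def knight_vs_king(knight_position, king_position):
--     columns = ['f1','f2','A','B','C','D','E','F','G','H','f3','f4']
--     kx, kl = knight_position
--     gx, gl = king_position
--     ky = columns.index(kl)
--     if gl not in columns:
--         return "None"
--     gy = columns.index(gl)
--     dx, dy = abs(gx - kx), abs(gy - ky)
--     if max(dx, dy) == 1:
--         return 'King'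
--     if sorted((dx, dy)) == [1, 2]:
--         return 'Knight'
--     return "None"
-- ===== Notes on version B (the rewrite author's own statement) =====
-- stated objective: simpler
-- what changed: B replaces A's enumeration of the 16 concrete king/knight move squares and list-membership tests by direct coordinate arithmetic: it converts both positions to (row, column-index) and decides by the distances dx, dy (max==1 -> King, sorted [1,2] -> Knight).
-- outside the precondition, e.g. on knight_vs_king((1, 'f1'), (2, 'f4')): A returns 'King', B returns 'None'; on knight_vs_king((1, 'f2'), (2, 'f4')): A returns 'Knight', B returns 'None'
import Mathlib
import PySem

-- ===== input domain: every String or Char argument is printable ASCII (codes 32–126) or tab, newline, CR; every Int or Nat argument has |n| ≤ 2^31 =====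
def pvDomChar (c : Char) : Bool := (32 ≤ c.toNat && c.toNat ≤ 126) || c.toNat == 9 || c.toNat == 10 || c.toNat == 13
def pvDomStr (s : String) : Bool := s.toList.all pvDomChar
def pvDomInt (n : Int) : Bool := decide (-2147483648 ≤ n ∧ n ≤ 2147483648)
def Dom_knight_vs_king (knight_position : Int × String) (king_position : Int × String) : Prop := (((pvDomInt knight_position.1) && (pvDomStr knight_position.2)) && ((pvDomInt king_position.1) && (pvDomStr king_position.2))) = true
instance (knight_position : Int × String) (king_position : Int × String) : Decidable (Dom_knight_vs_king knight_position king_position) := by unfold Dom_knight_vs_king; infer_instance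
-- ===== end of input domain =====

-- B replaces A's enumeration of the 16 move squares and membership tests by direct
-- coordinate arithmetic on (row, column-index) distances; equally fast, simpler.


-- ===== PORT A =====
-- literal port of A; where Python raises (knight letter not in columns → ValueError,
-- or columns[y±2] out of range → IndexError) the port returns "None"; Pre_ excludes those.
def knight_vs_king (knight_position : Int × String) (king_position : Int × String) : String :=
  let columns : List String := ["f1","f2","A","B","C","D","E","F","G","H","f3","f4"]
  let x := knight_position.1
  match PySem.List.index? columns knight_position.2 with
  | none => "None"  -- Python: ValueError
  | some y =>
    let yI : Int := (y : Int)
    match PySem.List.pyGet? columns yI, PySem.List.pyGet? columns (yI - 1),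
          PySem.List.pyGet? columns (yI + 1), PySem.List.pyGet? columns (yI - 2),
          PySem.List.pyGet? columns (yI + 2) with
    | some y_ct, some y_lf, some y_rt, some y_lflf, some y_rtrt =>
      let kg_pos : List (Int × String) :=
        [(x+1, y_lf), (x+1, y_rt), (x+1, y_ct), (x-1, y_lf),
         (x-1, y_rt), (x-1, y_ct), (x, y_lf), (x, y_rt)]
      let kn_pos : List (Int × String) :=
        [(x+2, y_lf), (x+2, y_rt), (x+1, y_lflf),
         (x+1, y_rtrt), (x-2, y_lf), (x-2, y_rt),
         (x-1, y_lflf), (x-1, y_rtrt)]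
      if king_position ∈ kg_pos then "King"
      else if king_position ∈ kn_pos then "Knight"
      else "None"
    | _, _, _, _, _ => "None"  -- Python: IndexError

-- ===== PORT B =====
def knight_vs_king_alt (knight_position : Int × String) (king_position : Int × String) : String :=
  let columns : List String := ["f1","f2","A","B","C","D","E","F","G","H","f3","f4"]
  match PySem.List.index? columns knight_position.2 with
  | none => "None"  -- Python: ValueError (same as A; excluded by Pre_)
  | some ky =>
    match PySem.List.index? columns king_position.2 with
    | none => "None"
    | some gy =>
      let dx : Nat := (king_position.1 - knight_position.1).natAbs
      let dy : Nat := ((gy : Int) - (ky : Int)).natAbs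
      if max dx dy = 1 then "King"
      else if [min dx dy, max dx dy] = ([1, 2] : List Nat) then "Knight"
      else "None"

-- ===== PRECONDITION & SPEC =====
-- Pre_ admits exactly the real board columns for the knight: on letters outside the
-- 12-entry columns list A raises ValueError, on the padding letters 'f3'/'f4' it raises
-- IndexError (columns[y+2]), and on 'f1'/'f2' A's negative-index wraparound produces an
-- accidental verdict that no specification would pick (see cites).
def Pre_knight_vs_king (knight_position : Int × String) (king_position : Int × String) : Prop :=
  knight_position.2 ∈ (["A","B","C","D","E","F","G","H"] : List String)
instance (knight_position : Int × String) (king_position : Int × String) : Decidable (Pre_knight_vs_king knight_position king_position) := by unfold Pre_knight_vs_king; infer_instance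
def pvWitness_knight_vs_king : (Int × String) × (Int × String) := ((1, "A"), (2, "B"))

def Spec_knight_vs_king (knight_position : Int × String) (king_position : Int × String) (out : String) : Prop := out = knight_vs_king_alt knight_position king_position
instance (knight_position : Int × String) (king_position : Int × String) (out : String) : Decidable (Spec_knight_vs_king knight_position king_position out) := by unfold Spec_knight_vs_king; infer_instance

-- ===== CLAIM (what is proved, stated in full; the proofs are below) =====
def Claim_equal_knight_vs_king : Prop := ∀ (knight_position : Int × String) (king_position : Int × String), Dom_knight_vs_king knight_position king_position → Pre_knight_vs_king knight_position king_position → Spec_knight_vs_king knight_position king_position (knight_vs_king knight_position king_position)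
-- ===== LEMMAS AND PROOFS =====
-- enumeration of the possible king column letters
lemma pv_gl_cases (gl : String) :
    gl = "f1" ∨ gl = "f2" ∨ gl = "A" ∨ gl = "B" ∨ gl = "C" ∨ gl = "D" ∨ gl = "E" ∨
    gl = "F" ∨ gl = "G" ∨ gl = "H" ∨ gl = "f3" ∨ gl = "f4" ∨
    gl ∉ (["f1","f2","A","B","C","D","E","F","G","H","f3","f4"] : List String) := by
  by_cases h : gl ∈ (["f1","f2","A","B","C","D","E","F","G","H","f3","f4"] : List String)
  · simp only [List.mem_cons, List.not_mem_nil, or_false] at h; tauto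
  · tauto

lemma pv_index?_none {gl : String}
    (h : gl ∉ (["f1","f2","A","B","C","D","E","F","G","H","f3","f4"] : List String)) :
    PySem.List.index? (["f1","f2","A","B","C","D","E","F","G","H","f3","f4"] : List String) gl = none :=
  (PySem.List.index?_eq_none_iff _ _).mpr h

-- ===== VERDICT (by name: the statement is the Claim_ definition above) =====
set_option maxHeartbeats 4000000 in
theorem knight_vs_king_spec : Claim_equal_knight_vs_king := by
  intro kn kg _ hpre
  obtain ⟨x, kl⟩ := kn
  obtain ⟨gx, gl⟩ := kg
  unfold Spec_knight_vs_king
  simp only [Pre_knight_vs_king, List.mem_cons, List.not_mem_nil, or_false] at hpre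
  rcases pv_gl_cases gl with hg|hg|hg|hg|hg|hg|hg|hg|hg|hg|hg|hg|hg <;>
    [subst hg; subst hg; subst hg; subst hg; subst hg; subst hg; subst hg; subst hg;
     subst hg; subst hg; subst hg; subst hg; skip] <;>
  rcases hpre with h|h|h|h|h|h|h|h <;> subst h <;>
    first
    | (simp only [knight_vs_king, knight_vs_king_alt, pv_index?_none hg]
       simp [PySem.List.index?, List.idxOf?, List.findIdx?_cons,
             PySem.List.pyGet?, PySem.List.pyIdx?, Prod.mk.injEq]
       try (split_ifs <;> simp_all <;> omega))
    | (simp [knight_vs_king, knight_vs_king_alt, PySem.List.index?, List.idxOf?,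
             List.findIdx?_cons, PySem.List.pyGet?, PySem.List.pyIdx?, Prod.mk.injEq]
       try (split_ifs <;> simp_all <;> omega))
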